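-- pv_equiv track=rewrite | github.com/sgahovey/projet_auto | tools/kanban_generate.py | determine_scope
-- ===== SOURCE A (Python) =====
-- from collections import Counter
-- from typing import Dict, List, Optional, Tuple
--
-- def determine_scope(
--     scope_weights: Counter,
--     message: str,
--     override_scope: Optional[str],
-- ) -> Optional[str]:
--     if override_scope is not None:
--         if override_scope == "none":
--             return None
--         return override_scope
--
--     if scope_weights:
--         max_weight = max(scope_weights.values())
--         candidates = [scope for scope, weight in scope_weights.items() if weight == max_weight]
--         priority = [
--             "backend",
--             "frontend",
--             "docker",
--             "ansible",
--             "monitoring",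
--             "github-actions",
--             "prod",
--             "init",
--         ]
--         for preferred in priority:
--             if preferred in candidates:
--                 return preferred
--         return candidates[0]
--
--     lowered = message.lower()
--     keyword_scope_map = [
--         ("frontend", "frontend"),
--         ("backend", "backend"),
--         ("docker", "docker"),
--         ("ansible", "ansible"),
--         ("monitor", "monitoring"),
--         ("grafana", "monitoring"),
--         ("prometheus", "monitoring"),
--         ("github", "github-actions"),
--         ("gha", "github-actions"),
--         ("prod", "prod"),
--         ("production", "prod"),
--         ("deploy", "prod"),
--         ("init", "init"),
--         ("initial", "init"),
--     ]
--     for keyword, scope in keyword_scope_map: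
--         if keyword in lowered:
--             return scope
--     return None
-- ===== SOURCE B (Python) =====
-- from collections import Counter
-- from typing import Optional
--
--
-- PRIORITY = [
--     "backend",
--     "frontend",
--     "docker",
--     "ansible",
--     "monitoring",
--     "github-actions",
--     "prod",
--     "init",
-- ]
--
-- # keywords grouped per scope, in the same overall scan order as A's flat list
-- SCOPE_KEYWORDS = [
--     ("frontend", ["frontend"]),
--     ("backend", ["backend"]),
--     ("docker", ["docker"]),
--     ("ansible", ["ansible"]),
--     ("monitoring", ["monitor", "grafana", "prometheus"]),
--     ("github-actions", ["github", "gha"]),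
--     ("prod", ["prod", "production", "deploy"]),
--     ("init", ["init", "initial"]),
-- ]
--
--
-- def determine_scope(
--     scope_weights: Counter,
--     message: str,
--     override_scope: Optional[str],
-- ) -> Optional[str]:
--     if override_scope is not None:
--         return None if override_scope == "none" else override_scope
--
--     if scope_weights:
--         # single pass keeping the running best (name, key); key compares by
--         # weight first, then by position in PRIORITY (earlier wins; names
--         # outside PRIORITY share the lowest rank). Strict '>' keeps the
--         # earliest-inserted name on full ties, matching A's candidates[0].
--         best_name = None
--         best_key = None
--         for name, weight in scope_weights.items():
--             idx = PRIORITY.index(name) if name in PRIORITY else len(PRIORITY)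
--             key = (weight, -idx)
--             if best_key is None or key > best_key:
--                 best_name, best_key = name, key
--         return best_name
--
--     lowered = message.lower()
--     for scope, keywords in SCOPE_KEYWORDS:
--         if any(kw in lowered for kw in keywords):
--             return scope
--     return None
-- ===== Notes on version B (the rewrite author's own statement) =====
-- stated objective: simpler
-- what changed: A's three staged passes (max over values, filter the tied candidates, scan a priority list) become one accumulator loop over the items keeping the running best (name, (weight, -priority index)) under strict lexicographic '>', and A's flat 14-entry keyword scan becomes a scan over 8 per-scope keyword groups with any().
import Mathlib
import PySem

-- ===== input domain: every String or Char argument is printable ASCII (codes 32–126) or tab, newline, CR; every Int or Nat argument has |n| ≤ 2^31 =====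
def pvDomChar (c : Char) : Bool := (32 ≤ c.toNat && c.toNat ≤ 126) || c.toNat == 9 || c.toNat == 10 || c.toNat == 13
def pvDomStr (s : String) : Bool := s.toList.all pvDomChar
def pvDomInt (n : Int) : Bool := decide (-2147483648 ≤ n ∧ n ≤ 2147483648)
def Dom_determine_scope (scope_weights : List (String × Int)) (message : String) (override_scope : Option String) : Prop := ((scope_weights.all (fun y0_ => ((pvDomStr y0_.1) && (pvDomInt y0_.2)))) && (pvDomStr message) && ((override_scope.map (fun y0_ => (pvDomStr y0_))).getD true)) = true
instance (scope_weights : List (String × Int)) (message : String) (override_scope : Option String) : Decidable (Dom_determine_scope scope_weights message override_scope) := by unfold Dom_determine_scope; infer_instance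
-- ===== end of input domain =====

-- B replaces A's three staged passes (max/filter/priority scan) by one accumulator loop with a lexicographic key, and the flat keyword scan by grouped per-scope keyword lists; same values, different decomposition.


-- ===== PORT A =====
def psPriorityA : List String :=
  ["backend", "frontend", "docker", "ansible", "monitoring", "github-actions", "prod", "init"]

def psKeywordMapA : List (String × String) :=
  [("frontend", "frontend"), ("backend", "backend"), ("docker", "docker"), ("ansible", "ansible"),
   ("monitor", "monitoring"), ("grafana", "monitoring"), ("prometheus", "monitoring"),
   ("github", "github-actions"), ("gha", "github-actions"), ("prod", "prod"),
   ("production", "prod"), ("deploy", "prod"), ("init", "init"), ("initial", "init")]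

-- `for preferred in priority: if preferred in candidates: return preferred`
def psPrioScanA : List String → List String → Option String
  | [], _ => none
  | p :: rest, candidates =>
    if candidates.contains p then some p else psPrioScanA rest candidates

-- `for keyword, scope in keyword_scope_map: if keyword in lowered: return scope`
def psKwScanA : List (String × String) → String → Option String
  | [], _ => none
  | (kw, sc) :: rest, lowered =>
    if PySem.Str.isIn kw lowered then some sc else psKwScanA rest lowered

def determine_scope (scope_weights : List (String × Int)) (message : String) (override_scope : Option String) : Option String :=
  match override_scope with
  | some ov => if ov = "none" then none else some ov
  | none =>
    if !scope_weights.isEmpty then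
      match PySem.List.max? (scope_weights.map (fun kv => kv.2)) (fun w => w) with
      | none => none  -- unreachable: the list is nonempty
      | some max_weight =>
        let candidates := (scope_weights.filter (fun kv => kv.2 == max_weight)).map (fun kv => kv.1)
        match psPrioScanA psPriorityA candidates with
        | some p => some p
        | none => PySem.List.pyGet? candidates 0   -- candidates[0]
    else
      psKwScanA psKeywordMapA (PySem.Str.lower message)

-- ===== PORT B =====
def psPriorityB : List String :=
  ["backend", "frontend", "docker", "ansible", "monitoring", "github-actions", "prod", "init"]

-- keywords grouped per scope, in the same overall scan order as A's flat list
def psScopeKeywordsB : List (String × List String) :=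
  [("frontend", ["frontend"]),
   ("backend", ["backend"]),
   ("docker", ["docker"]),
   ("ansible", ["ansible"]),
   ("monitoring", ["monitor", "grafana", "prometheus"]),
   ("github-actions", ["github", "gha"]),
   ("prod", ["prod", "production", "deploy"]),
   ("init", ["init", "initial"])]

-- `PRIORITY.index(name) if name in PRIORITY else len(PRIORITY)`
def psIdxOfB (name : String) : Nat :=
  match PySem.List.index? psPriorityB name with
  | some i => i
  | none => psPriorityB.length

-- one step of B's loop: keep the running best (name, key) under strict lexicographic '>'
def psBestStepB (best : Option (String × Int × Int)) (kv : String × Int) : Option (String × Int × Int) :=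
  let key : Int × Int := (kv.2, -(psIdxOfB kv.1 : Int))
  match best with
  | none => some (kv.1, key)
  | some (bn, bk) =>
    if bk.1 < key.1 ∨ (bk.1 = key.1 ∧ bk.2 < key.2) then some (kv.1, key) else some (bn, bk)

-- `for scope, keywords in SCOPE_KEYWORDS: if any(kw in lowered for kw in keywords): return scope`
def psGroupScanB : List (String × List String) → String → Option String
  | [], _ => none
  | (sc, kws) :: rest, lowered =>
    if kws.any (fun kw => PySem.Str.isIn kw lowered) then some sc else psGroupScanB rest lowered

def determine_scope_alt (scope_weights : List (String × Int)) (message : String) (override_scope : Option String) : Option String :=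
  match override_scope with
  | some ov => if ov = "none" then none else some ov
  | none =>
    if !scope_weights.isEmpty then
      (scope_weights.foldl psBestStepB none).map (fun b => b.1)
    else
      psGroupScanB psScopeKeywordsB (PySem.Str.lower message)

-- ===== PRECONDITION & SPEC =====
def Spec_determine_scope (scope_weights : List (String × Int)) (message : String) (override_scope : Option String) (out : Option String) : Prop := out = determine_scope_alt scope_weights message override_scope
instance (scope_weights : List (String × Int)) (message : String) (override_scope : Option String) (out : Option String) : Decidable (Spec_determine_scope scope_weights message override_scope out) := by unfold Spec_determine_scope; infer_instance

-- ===== CLAIM (what is proved, stated in full; the proofs are below) =====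
def Claim_equal_determine_scope : Prop := ∀ (scope_weights : List (String × Int)) (message : String) (override_scope : Option String), Dom_determine_scope scope_weights message override_scope → Spec_determine_scope scope_weights message override_scope (determine_scope scope_weights message override_scope)

-- ===== LEMMAS AND PROOFS =====

-- closed form of B's rank -(PRIORITY.index(name) or len)
def rnk (s : String) : Int :=
  if s = "backend" then 0 else if s = "frontend" then -1 else if s = "docker" then -2
  else if s = "ansible" then -3 else if s = "monitoring" then -4
  else if s = "github-actions" then -5 else if s = "prod" then -6
  else if s = "init" then -7 else -8

set_option maxHeartbeats 2000000 in
theorem idx_rnk (s : String) : -((psIdxOfB s : Nat) : Int) = rnk s := by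
  unfold rnk
  split_ifs with h0 h1 h2 h3 h4 h5 h6 h7
  · subst h0; decide
  · subst h1; decide
  · subst h2; decide
  · subst h3; decide
  · subst h4; decide
  · subst h5; decide
  · subst h6; decide
  · subst h7; decide
  · have hnone : PySem.List.index? psPriorityB s = none := by
      rw [PySem.List.index?_eq_none_iff]
      simp only [psPriorityB, List.mem_cons, List.not_mem_nil, or_false]
      tauto
    simp only [psIdxOfB, hnone]
    decide

def selGo : (String × Int) → List (String × Int) → (String × Int)
  | b, [] => b
  | b, x :: l =>
    selGo (if b.2 < x.2 ∨ (b.2 = x.2 ∧ rnk b.1 < rnk x.1) then x else b) l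

theorem step_some (b : String × Int) (x : String × Int) :
    psBestStepB (some (b.1, b.2, rnk b.1)) x
      = some ((selGo b [x]).1, (selGo b [x]).2, rnk (selGo b [x]).1) := by
  simp only [psBestStepB, idx_rnk, selGo]
  by_cases h : b.2 < x.2 ∨ (b.2 = x.2 ∧ rnk b.1 < rnk x.1)
  · rw [if_pos h, if_pos h]
  · rw [if_neg h, if_neg h]

theorem fold_selGo (t : List (String × Int)) : ∀ (b : String × Int),
    t.foldl psBestStepB (some (b.1, b.2, rnk b.1))
      = some ((selGo b t).1, (selGo b t).2, rnk (selGo b t).1) := by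
  induction t with
  | nil => intro b; rfl
  | cons x l ih =>
    intro b
    rw [List.foldl_cons, step_some b x]
    have : selGo b (x :: l) = selGo (selGo b [x]) l := by
      simp only [selGo]
    rw [this]
    exact ih (selGo b [x])

def mw (w : Int) (l : List (String × Int)) : Int := (l.map (fun kv => kv.2)).foldl max w
def cands (b : String × Int) (l : List (String × Int)) : List String :=
  ((b :: l).filter (fun kv => kv.2 == mw b.2 l)).map (fun kv => kv.1)
def TGo : String → List String → String
  | a, [] => a
  | a, n :: c => TGo (if rnk a < rnk n then n else a) c
def Tl : List String → Option String
  | [] => none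
  | a :: c => some (TGo a c)

def SChoice (c : List String) : Option String :=
  match psPrioScanA psPriorityA c with
  | some p => some p
  | none => PySem.List.pyGet? c 0

theorem mw_cons (w : Int) (x : String × Int) (l : List (String × Int)) :
    mw w (x :: l) = mw (max w x.2) l := rfl

theorem le_mw (w : Int) (l : List (String × Int)) : w ≤ mw w l := by
  unfold mw
  exact (PySem.List.le_foldl_max (l.map (fun kv => kv.2)) w).1

theorem main_sel (l : List (String × Int)) : ∀ b, Tl (cands b l) = some (selGo b l).1 := by
  induction l with
  | nil =>
    intro b
    simp [cands, mw, Tl, TGo, selGo]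
  | cons x l ih =>
    intro b
    have hsel : selGo b (x :: l)
        = selGo (if b.2 < x.2 ∨ (b.2 = x.2 ∧ rnk b.1 < rnk x.1) then x else b) l := rfl
    rw [hsel]
    set b' := (if b.2 < x.2 ∨ (b.2 = x.2 ∧ rnk b.1 < rnk x.1) then x else b) with hb'
    rw [← ih b']
    rcases lt_trichotomy b.2 x.2 with hlt | heq | hgt
    · -- b.2 < x.2 : b is never a candidate and b' = x
      have hb'x : b' = x := by rw [hb', if_pos (Or.inl hlt)]
      have hWx : mw b.2 (x :: l) = mw x.2 l := by
        rw [mw_cons]; congr 1; omega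
      have hble : (b.2 == mw x.2 l) = false := by
        have hle := le_mw x.2 l
        simp only [beq_eq_false_iff_ne, ne_eq]
        omega
      rw [hb'x]
      unfold cands
      rw [hWx]
      simp [List.filter_cons, hble]
    · -- tie on weights
      have hxb : x.2 = b.2 := heq.symm
      have hW : mw b.2 (x :: l) = mw b.2 l := by
        rw [mw_cons]; congr 1; omega
      have hb'2 : b'.2 = b.2 := by
        rw [hb']; split <;> omega
      by_cases hw : b.2 = mw b.2 l
      · have hpb : (b.2 == mw b.2 l) = true := beq_iff_eq.mpr hw
        have hpx : (x.2 == mw b.2 l) = true := beq_iff_eq.mpr (hxb.trans hw)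
        have hpb'c : (b'.2 == mw b.2 l) = true := by rw [hb'2]; exact hpb
        unfold cands
        rw [hW, show mw b'.2 l = mw b.2 l from by rw [hb'2]]
        simp only [List.filter_cons, hpb, hpx, hpb'c, if_true, List.map_cons]
        have hfst : b'.1 = if rnk b.1 < rnk x.1 then x.1 else b.1 := by
          rw [hb']
          by_cases h : rnk b.1 < rnk x.1
          · rw [if_pos (Or.inr ⟨heq, h⟩), if_pos h]
          · rw [if_neg (by rintro (h1 | ⟨_, h2⟩); omega; exact h h2), if_neg h]
        rw [hfst]
        unfold Tl
        rfl
      · have hlt2 : b.2 < mw b.2 l := lt_of_le_of_ne (le_mw b.2 l) hw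
        have hpb : (b.2 == mw b.2 l) = false := by
          simp only [beq_eq_false_iff_ne, ne_eq]; omega
        have hpx : (x.2 == mw b.2 l) = false := by
          simp only [beq_eq_false_iff_ne, ne_eq]; omega
        have hpb'c : (b'.2 == mw b.2 l) = false := by rw [hb'2]; exact hpb
        unfold cands
        rw [hW, show mw b'.2 l = mw b.2 l from by rw [hb'2]]
        simp only [List.filter_cons, hpb, hpx, hpb'c, Bool.false_eq_true, if_false]
    · -- x.2 < b.2 : x is never a candidate and b' = b
      have hb'b : b' = b := by
        rw [hb', if_neg (by rintro (h1 | ⟨h2, _⟩) <;> omega)]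
      have hW : mw b.2 (x :: l) = mw b.2 l := by
        rw [mw_cons]; congr 1; omega
      have hxle : (x.2 == mw b.2 l) = false := by
        have hle := le_mw b.2 l
        simp only [beq_eq_false_iff_ne, ne_eq]
        omega
      rw [hb'b]
      unfold cands
      rw [hW]
      simp [List.filter_cons, hxle]

theorem rnk_cases (s : String) :
    rnk s = -8 ∨ (rnk s = 0 ∧ s = "backend") ∨ (rnk s = -1 ∧ s = "frontend")
    ∨ (rnk s = -2 ∧ s = "docker") ∨ (rnk s = -3 ∧ s = "ansible")
    ∨ (rnk s = -4 ∧ s = "monitoring") ∨ (rnk s = -5 ∧ s = "github-actions")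
    ∨ (rnk s = -6 ∧ s = "prod") ∨ (rnk s = -7 ∧ s = "init") := by
  unfold rnk; split_ifs <;> simp_all

theorem TGo_mem : ∀ (c : List String) (a : String), TGo a c ∈ a :: c := by
  intro c
  induction c with
  | nil => intro a; simp [TGo]
  | cons n c ih =>
    intro a
    unfold TGo
    split
    · have := ih n
      rcases List.mem_cons.mp this with h | h
      · simp [h]
      · simp [h]
    · have := ih a
      rcases List.mem_cons.mp this with h | h
      · simp [h]
      · simp [h]

theorem TGo_ub : ∀ (c : List String) (a y : String), y ∈ a :: c → rnk y ≤ rnk (TGo a c) := by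
  intro c
  induction c with
  | nil =>
    intro a y hy
    simp at hy
    simp [TGo, hy]
  | cons n c ih =>
    intro a y hy
    unfold TGo
    have hself : ∀ p : String, rnk p ≤ rnk (TGo p c) := fun p => ih p p (List.mem_cons_self ..)
    rcases List.mem_cons.mp hy with rfl | hy2
    · split <;> rename_i h
      · exact le_trans (le_of_lt h) (hself n)
      · exact hself y
    · rcases List.mem_cons.mp hy2 with rfl | hy3
      · split <;> rename_i h
        · exact hself y
        · exact le_trans (not_lt.mp h) (hself a)
      · split <;> exact ih _ y (List.mem_cons_of_mem _ hy3)

theorem TGo_const : ∀ (c : List String) (a : String), (∀ y ∈ a :: c, rnk y = -8) → TGo a c = a := by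
  intro c
  induction c with
  | nil => intro a _; rfl
  | cons n c ih =>
    intro a hall
    unfold TGo
    have ha := hall a (by simp)
    have hn := hall n (by simp)
    rw [if_neg (by omega)]
    exact ih a (fun y hy => by
      rcases List.mem_cons.mp hy with rfl | hy2
      · exact ha
      · exact hall y (by simp [hy2]))

theorem S_eq_T (a : String) (c : List String) : SChoice (a :: c) = some (TGo a c) := by
  by_cases h0 : "backend" ∈ a :: c
  · have hc0 : ((a :: c).contains "backend") = true := List.contains_iff_mem.mpr h0
    simp only [SChoice, psPriorityA, psPrioScanA, hc0, if_true]
    have hub : (0 : Int) ≤ rnk (TGo a c) := by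
      have h := TGo_ub c a "backend" h0
      have e : rnk "backend" = (0 : Int) := by decide
      omega
    rcases rnk_cases (TGo a c) with hv | ⟨hv, he⟩ | ⟨hv, he⟩ | ⟨hv, he⟩ | ⟨hv, he⟩ | ⟨hv, he⟩ | ⟨hv, he⟩ | ⟨hv, he⟩ | ⟨hv, he⟩
    · omega
    · rw [he]
    · omega
    · omega
    · omega
    · omega
    · omega
    · omega
    · omega
  have hc0 : ((a :: c).contains "backend") = false := by
    exact Bool.not_eq_true _ ▸ (by simpa using h0)
  by_cases h1 : "frontend" ∈ a :: c
  · have hc1 : ((a :: c).contains "frontend") = true := List.contains_iff_mem.mpr h1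
    simp only [SChoice, psPriorityA, psPrioScanA, hc0, hc1, Bool.false_eq_true, if_false, if_true]
    have hub : (-1 : Int) ≤ rnk (TGo a c) := by
      have h := TGo_ub c a "frontend" h1
      have e : rnk "frontend" = (-1 : Int) := by decide
      omega
    rcases rnk_cases (TGo a c) with hv | ⟨hv, he⟩ | ⟨hv, he⟩ | ⟨hv, he⟩ | ⟨hv, he⟩ | ⟨hv, he⟩ | ⟨hv, he⟩ | ⟨hv, he⟩ | ⟨hv, he⟩
    · omega
    · exact absurd (he ▸ TGo_mem c a) h0
    · rw [he]
    · omega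
    · omega
    · omega
    · omega
    · omega
    · omega
  have hc1 : ((a :: c).contains "frontend") = false := by
    exact Bool.not_eq_true _ ▸ (by simpa using h1)
  by_cases h2 : "docker" ∈ a :: c
  · have hc2 : ((a :: c).contains "docker") = true := List.contains_iff_mem.mpr h2
    simp only [SChoice, psPriorityA, psPrioScanA, hc0, hc1, hc2, Bool.false_eq_true, if_false, if_true]
    have hub : (-2 : Int) ≤ rnk (TGo a c) := by
      have h := TGo_ub c a "docker" h2
      have e : rnk "docker" = (-2 : Int) := by decide
      omega
    rcases rnk_cases (TGo a c) with hv | ⟨hv, he⟩ | ⟨hv, he⟩ | ⟨hv, he⟩ | ⟨hv, he⟩ | ⟨hv, he⟩ | ⟨hv, he⟩ | ⟨hv, he⟩ | ⟨hv, he⟩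
    · omega
    · exact absurd (he ▸ TGo_mem c a) h0
    · exact absurd (he ▸ TGo_mem c a) h1
    · rw [he]
    · omega
    · omega
    · omega
    · omega
    · omega
  have hc2 : ((a :: c).contains "docker") = false := by
    exact Bool.not_eq_true _ ▸ (by simpa using h2)
  by_cases h3 : "ansible" ∈ a :: c
  · have hc3 : ((a :: c).contains "ansible") = true := List.contains_iff_mem.mpr h3
    simp only [SChoice, psPriorityA, psPrioScanA, hc0, hc1, hc2, hc3, Bool.false_eq_true, if_false, if_true]
    have hub : (-3 : Int) ≤ rnk (TGo a c) := by
      have h := TGo_ub c a "ansible" h3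
      have e : rnk "ansible" = (-3 : Int) := by decide
      omega
    rcases rnk_cases (TGo a c) with hv | ⟨hv, he⟩ | ⟨hv, he⟩ | ⟨hv, he⟩ | ⟨hv, he⟩ | ⟨hv, he⟩ | ⟨hv, he⟩ | ⟨hv, he⟩ | ⟨hv, he⟩
    · omega
    · exact absurd (he ▸ TGo_mem c a) h0
    · exact absurd (he ▸ TGo_mem c a) h1
    · exact absurd (he ▸ TGo_mem c a) h2
    · rw [he]
    · omega
    · omega
    · omega
    · omega
  have hc3 : ((a :: c).contains "ansible") = false := by
    exact Bool.not_eq_true _ ▸ (by simpa using h3)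
  by_cases h4 : "monitoring" ∈ a :: c
  · have hc4 : ((a :: c).contains "monitoring") = true := List.contains_iff_mem.mpr h4
    simp only [SChoice, psPriorityA, psPrioScanA, hc0, hc1, hc2, hc3, hc4, Bool.false_eq_true, if_false, if_true]
    have hub : (-4 : Int) ≤ rnk (TGo a c) := by
      have h := TGo_ub c a "monitoring" h4
      have e : rnk "monitoring" = (-4 : Int) := by decide
      omega
    rcases rnk_cases (TGo a c) with hv | ⟨hv, he⟩ | ⟨hv, he⟩ | ⟨hv, he⟩ | ⟨hv, he⟩ | ⟨hv, he⟩ | ⟨hv, he⟩ | ⟨hv, he⟩ | ⟨hv, he⟩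
    · omega
    · exact absurd (he ▸ TGo_mem c a) h0
    · exact absurd (he ▸ TGo_mem c a) h1
    · exact absurd (he ▸ TGo_mem c a) h2
    · exact absurd (he ▸ TGo_mem c a) h3
    · rw [he]
    · omega
    · omega
    · omega
  have hc4 : ((a :: c).contains "monitoring") = false := by
    exact Bool.not_eq_true _ ▸ (by simpa using h4)
  by_cases h5 : "github-actions" ∈ a :: c
  · have hc5 : ((a :: c).contains "github-actions") = true := List.contains_iff_mem.mpr h5
    simp only [SChoice, psPriorityA, psPrioScanA, hc0, hc1, hc2, hc3, hc4, hc5, Bool.false_eq_true, if_false, if_true]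
    have hub : (-5 : Int) ≤ rnk (TGo a c) := by
      have h := TGo_ub c a "github-actions" h5
      have e : rnk "github-actions" = (-5 : Int) := by decide
      omega
    rcases rnk_cases (TGo a c) with hv | ⟨hv, he⟩ | ⟨hv, he⟩ | ⟨hv, he⟩ | ⟨hv, he⟩ | ⟨hv, he⟩ | ⟨hv, he⟩ | ⟨hv, he⟩ | ⟨hv, he⟩
    · omega
    · exact absurd (he ▸ TGo_mem c a) h0
    · exact absurd (he ▸ TGo_mem c a) h1
    · exact absurd (he ▸ TGo_mem c a) h2
    · exact absurd (he ▸ TGo_mem c a) h3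
    · exact absurd (he ▸ TGo_mem c a) h4
    · rw [he]
    · omega
    · omega
  have hc5 : ((a :: c).contains "github-actions") = false := by
    exact Bool.not_eq_true _ ▸ (by simpa using h5)
  by_cases h6 : "prod" ∈ a :: c
  · have hc6 : ((a :: c).contains "prod") = true := List.contains_iff_mem.mpr h6
    simp only [SChoice, psPriorityA, psPrioScanA, hc0, hc1, hc2, hc3, hc4, hc5, hc6, Bool.false_eq_true, if_false, if_true]
    have hub : (-6 : Int) ≤ rnk (TGo a c) := by
      have h := TGo_ub c a "prod" h6
      have e : rnk "prod" = (-6 : Int) := by decide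
      omega
    rcases rnk_cases (TGo a c) with hv | ⟨hv, he⟩ | ⟨hv, he⟩ | ⟨hv, he⟩ | ⟨hv, he⟩ | ⟨hv, he⟩ | ⟨hv, he⟩ | ⟨hv, he⟩ | ⟨hv, he⟩
    · omega
    · exact absurd (he ▸ TGo_mem c a) h0
    · exact absurd (he ▸ TGo_mem c a) h1
    · exact absurd (he ▸ TGo_mem c a) h2
    · exact absurd (he ▸ TGo_mem c a) h3
    · exact absurd (he ▸ TGo_mem c a) h4
    · exact absurd (he ▸ TGo_mem c a) h5
    · rw [he]
    · omega
  have hc6 : ((a :: c).contains "prod") = false := by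
    exact Bool.not_eq_true _ ▸ (by simpa using h6)
  by_cases h7 : "init" ∈ a :: c
  · have hc7 : ((a :: c).contains "init") = true := List.contains_iff_mem.mpr h7
    simp only [SChoice, psPriorityA, psPrioScanA, hc0, hc1, hc2, hc3, hc4, hc5, hc6, hc7, Bool.false_eq_true, if_false, if_true]
    have hub : (-7 : Int) ≤ rnk (TGo a c) := by
      have h := TGo_ub c a "init" h7
      have e : rnk "init" = (-7 : Int) := by decide
      omega
    rcases rnk_cases (TGo a c) with hv | ⟨hv, he⟩ | ⟨hv, he⟩ | ⟨hv, he⟩ | ⟨hv, he⟩ | ⟨hv, he⟩ | ⟨hv, he⟩ | ⟨hv, he⟩ | ⟨hv, he⟩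
    · omega
    · exact absurd (he ▸ TGo_mem c a) h0
    · exact absurd (he ▸ TGo_mem c a) h1
    · exact absurd (he ▸ TGo_mem c a) h2
    · exact absurd (he ▸ TGo_mem c a) h3
    · exact absurd (he ▸ TGo_mem c a) h4
    · exact absurd (he ▸ TGo_mem c a) h5
    · exact absurd (he ▸ TGo_mem c a) h6
    · rw [he]
  have hc7 : ((a :: c).contains "init") = false := by
    exact Bool.not_eq_true _ ▸ (by simpa using h7)
  have hall : ∀ y ∈ a :: c, rnk y = -8 := by
    intro y hy
    rcases rnk_cases y with hv | ⟨hv, he⟩ | ⟨hv, he⟩ | ⟨hv, he⟩ | ⟨hv, he⟩ | ⟨hv, he⟩ | ⟨hv, he⟩ | ⟨hv, he⟩ | ⟨hv, he⟩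
    · exact hv
    · exact absurd (he ▸ hy) h0
    · exact absurd (he ▸ hy) h1
    · exact absurd (he ▸ hy) h2
    · exact absurd (he ▸ hy) h3
    · exact absurd (he ▸ hy) h4
    · exact absurd (he ▸ hy) h5
    · exact absurd (he ▸ hy) h6
    · exact absurd (he ▸ hy) h7
  rw [TGo_const c a hall]
  simp only [SChoice, psPriorityA, psPrioScanA, hc0, hc1, hc2, hc3, hc4, hc5, hc6, hc7, Bool.false_eq_true, if_false]
  exact PySem.List.pyGet?_zero_cons ..

-- both keyword scans as functions of the 14 membership booleans
def kwA (c1 c2 c3 c4 c5 c6 c7 c8 c9 c10 c11 c12 c13 c14 : Bool) : Option String :=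
  if c1 then some "frontend" else if c2 then some "backend" else if c3 then some "docker"
  else if c4 then some "ansible" else if c5 then some "monitoring" else if c6 then some "monitoring"
  else if c7 then some "monitoring" else if c8 then some "github-actions" else if c9 then some "github-actions"
  else if c10 then some "prod" else if c11 then some "prod" else if c12 then some "prod"
  else if c13 then some "init" else if c14 then some "init" else none

def kwB (c1 c2 c3 c4 c5 c6 c7 c8 c9 c10 c11 c12 c13 c14 : Bool) : Option String :=
  if (c1 || false) then some "frontend" else if (c2 || false) then some "backend"
  else if (c3 || false) then some "docker"
  else if (c4 || false) then some "ansible" else if (c5 || (c6 || (c7 || false))) then some "monitoring"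
  else if (c8 || (c9 || false)) then some "github-actions"
  else if (c10 || (c11 || (c12 || false))) then some "prod"
  else if (c13 || (c14 || false)) then some "init" else none

theorem kwAB : ∀ c1 c2 c3 c4 c5 c6 c7 c8 c9 c10 c11 c12 c13 c14 : Bool,
    kwA c1 c2 c3 c4 c5 c6 c7 c8 c9 c10 c11 c12 c13 c14
      = kwB c1 c2 c3 c4 c5 c6 c7 c8 c9 c10 c11 c12 c13 c14 := by decide

set_option maxHeartbeats 2000000 in
theorem kw_eq (lowered : String) :
    psKwScanA psKeywordMapA lowered = psGroupScanB psScopeKeywordsB lowered := by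
  have hA : psKwScanA psKeywordMapA lowered
      = kwA (PySem.Str.isIn "frontend" lowered) (PySem.Str.isIn "backend" lowered)
          (PySem.Str.isIn "docker" lowered) (PySem.Str.isIn "ansible" lowered)
          (PySem.Str.isIn "monitor" lowered) (PySem.Str.isIn "grafana" lowered)
          (PySem.Str.isIn "prometheus" lowered) (PySem.Str.isIn "github" lowered)
          (PySem.Str.isIn "gha" lowered) (PySem.Str.isIn "prod" lowered)
          (PySem.Str.isIn "production" lowered) (PySem.Str.isIn "deploy" lowered)
          (PySem.Str.isIn "init" lowered) (PySem.Str.isIn "initial" lowered) := by rfl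
  have hB : psGroupScanB psScopeKeywordsB lowered
      = kwB (PySem.Str.isIn "frontend" lowered) (PySem.Str.isIn "backend" lowered)
          (PySem.Str.isIn "docker" lowered) (PySem.Str.isIn "ansible" lowered)
          (PySem.Str.isIn "monitor" lowered) (PySem.Str.isIn "grafana" lowered)
          (PySem.Str.isIn "prometheus" lowered) (PySem.Str.isIn "github" lowered)
          (PySem.Str.isIn "gha" lowered) (PySem.Str.isIn "prod" lowered)
          (PySem.Str.isIn "production" lowered) (PySem.Str.isIn "deploy" lowered)
          (PySem.Str.isIn "init" lowered) (PySem.Str.isIn "initial" lowered) := by rfl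
  rw [hA, hB]
  exact kwAB _ _ _ _ _ _ _ _ _ _ _ _ _ _

-- ===== VERDICT (by name: the statement is the Claim_ definition above) =====
theorem determine_scope_spec : Claim_equal_determine_scope := by
  intro sw msg ov _
  unfold Spec_determine_scope
  cases ov with
  | some o =>
    rfl
  | none =>
    cases sw with
    | nil =>
      exact kw_eq (PySem.Str.lower msg)
    | cons h t =>
      -- A side reduces to SChoice (cands h t)
      have hA : determine_scope (h :: t) msg none = SChoice (cands h t) := by
        have hmax : PySem.List.max? ((h :: t).map (fun kv => kv.2)) (fun w => w)
            = some (mw h.2 t) := by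
          rw [show (h :: t).map (fun kv : String × Int => kv.2)
                = h.2 :: t.map (fun kv => kv.2) from rfl]
          rw [PySem.List.max?_id_cons]
          rfl
        simp only [determine_scope, List.isEmpty_cons, Bool.not_false, if_true, hmax]
        rfl
      -- B side reduces to the accumulator loop
      have hB : determine_scope_alt (h :: t) msg none = some (selGo h t).1 := by
        have hstart : psBestStepB none h = some (h.1, h.2, rnk h.1) := by
          simp only [psBestStepB, idx_rnk]
        simp only [determine_scope_alt, List.isEmpty_cons, Bool.not_false, if_true,
          List.foldl_cons, hstart, fold_selGo t h, Option.map_some]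
      rw [hA, hB]
      have hm := main_sel t h
      cases hc : cands h t with
      | nil => rw [hc] at hm; exact absurd hm (by simp [Tl])
      | cons a c =>
        rw [hc] at hm
        rw [S_eq_T a c]
        exact (show Tl (a :: c) = some (TGo a c) from rfl) ▸ hm
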